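-- pv_equiv track=rewrite | github.com/dari-tkach/python-basics | hw/04/solution_06.py | iter_list
-- ===== SOURCE A (Python) =====
-- from itertools import cycle
--
-- def iter_list(user_str, num):
--     iter_cycle = []
--     c = 0
--     for el in cycle(user_str):
--         if c > num:
--             break
--         else:
--             iter_cycle.append(el)
--             c += 1
--     return iter_cycle
-- ===== SOURCE B (Python) =====
-- def iter_list(user_str, num):
--     chars = list(user_str)
--     total = num + 1
--     if not chars or total <= 0:
--         return []
--     q, r = divmod(total, len(chars))
--     return chars * q + chars[:r]
-- ===== Notes on version B (the rewrite author's own statement) =====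
-- stated objective: alternative
-- what changed: Replaces the itertools.cycle iterator with per-element counter/break by a staged construction: divmod(num+1, len) gives whole-copy and remainder counts, and the result is built as chars*q + chars[:r] with no per-element loop.
import Mathlib
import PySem

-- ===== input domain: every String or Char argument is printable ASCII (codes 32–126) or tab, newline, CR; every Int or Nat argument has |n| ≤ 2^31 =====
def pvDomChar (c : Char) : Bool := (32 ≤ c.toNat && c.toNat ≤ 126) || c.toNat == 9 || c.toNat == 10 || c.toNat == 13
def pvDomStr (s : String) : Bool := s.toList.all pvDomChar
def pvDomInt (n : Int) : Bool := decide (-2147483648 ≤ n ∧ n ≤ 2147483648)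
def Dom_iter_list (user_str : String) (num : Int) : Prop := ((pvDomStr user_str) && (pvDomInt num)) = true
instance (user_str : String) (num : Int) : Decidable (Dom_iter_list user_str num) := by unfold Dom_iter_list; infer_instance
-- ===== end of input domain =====

-- B drops the cycle iterator with a per-element counter/break loop and instead builds the
-- result in two staged pieces: divmod(num+1, len) whole copies plus a remainder prefix.

-- ===== PORT A =====
-- the for-loop over cycle(user_str): `rest` is the unconsumed part of the current
-- pass of the cycle (refilled from cs when exhausted), c the counter, acc iter_cycle.
-- cycle('') yields nothing, so the loop body never runs when cs = [] (handled in iter_list).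
def iterListGoA (cs : List Char) (num : Int) (h : cs ≠ []) :
    List Char → Int → List String → List String
  | rest, c, acc =>
    if _hc : c > num then acc
    else
      match rest with
      | [] => iterListGoA cs num h cs c acc
      | ch :: t => iterListGoA cs num h t (c + 1) (acc ++ [ch.toString])
  termination_by rest c _ => ((num + 1 - c).toNat, if rest.isEmpty then 1 else 0)
  decreasing_by
    · refine Prod.Lex.right _ ?_
      simp [List.isEmpty_iff, h]
    · exact Prod.Lex.left _ _ (by omega)

def iter_list (user_str : String) (num : Int) : List String :=
  let cs := user_str.toList
  if h : cs = [] then [] else iterListGoA cs num h cs 0 []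

-- ===== PORT B =====
-- chars * q + chars[:r]; the slice chars[:r] with 0 ≤ r is List.take r
def iter_list_alt (user_str : String) (num : Int) : List String :=
  let chars := user_str.toList.map Char.toString
  if chars = [] ∨ num + 1 ≤ 0 then []
  else
    PySem.List.pyRepeat chars (PySem.Int.floordiv (num + 1) (chars.length : Int)) ++
      chars.take (PySem.Int.mod (num + 1) (chars.length : Int)).toNat

-- ===== PRECONDITION & SPEC =====
def Spec_iter_list (user_str : String) (num : Int) (out : List String) : Prop := out = iter_list_alt user_str num
instance (user_str : String) (num : Int) (out : List String) : Decidable (Spec_iter_list user_str num out) := by unfold Spec_iter_list; infer_instance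

-- ===== CLAIM (what is proved, stated in full; the proofs are below) =====
def Claim_equal_iter_list : Prop := ∀ (user_str : String) (num : Int), Dom_iter_list user_str num → Spec_iter_list user_str num (iter_list user_str num)

-- ===== LEMMAS AND PROOFS =====

theorem iterListGoA_spec (cs : List Char) (num : Int) (h : cs ≠ [])
    (rest : List Char) (c : Int) (acc : List String)
    (hc : 0 ≤ c)
    (hrest : rest = cs.drop (PySem.Int.mod c (cs.length : Int)).toNat ∨
             (rest = [] ∧ PySem.Int.mod c (cs.length : Int) = 0)) :
    iterListGoA cs num h rest c acc =
      acc ++ (PySem.List.pyRange c (num + 1) 1).map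
        (fun i => (PySem.List.pyGetD cs (PySem.Int.mod i (cs.length : Int)) ' ').toString) := by
  have hn : (0 : Int) < (cs.length : Int) := by
    have := List.length_pos_iff.mpr h; exact_mod_cast this
  fun_induction iterListGoA cs num h rest c acc with
  | case1 rest c acc hbreak =>
    rw [PySem.List.pyRange_one_eq_nil (by omega)]
    simp
  | case2 c acc hbreak ih =>
    have hm0 : PySem.Int.mod c (cs.length : Int) = 0 := by
      rcases hrest with hr | ⟨_, hr⟩
      · exfalso
        have hmodc : PySem.Int.mod c (cs.length : Int) = c % (cs.length : Int) :=
          PySem.Int.mod_eq_emod_of_pos hn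
        have hlt : c % (cs.length : Int) < (cs.length : Int) := Int.emod_lt_of_pos c hn
        have hge : 0 ≤ c % (cs.length : Int) := Int.emod_nonneg c (by omega)
        have h1 : cs.length ≤ (PySem.Int.mod c (cs.length : Int)).toNat :=
          List.drop_eq_nil_iff.mp hr.symm
        omega
      · exact hr
    exact ih hc (Or.inl (by simp [hm0]))
  | case3 c acc hbreak ch t ih =>
    have hmodc : PySem.Int.mod c (cs.length : Int) = c % (cs.length : Int) :=
      PySem.Int.mod_eq_emod_of_pos hn
    have hge : 0 ≤ PySem.Int.mod c (cs.length : Int) := by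
      rw [hmodc]; exact Int.emod_nonneg c (by omega)
    have hltn : PySem.Int.mod c (cs.length : Int) < (cs.length : Int) := by
      rw [hmodc]; exact Int.emod_lt_of_pos c hn
    have hr : ch :: t = cs.drop (PySem.Int.mod c (cs.length : Int)).toNat := by
      rcases hrest with hr | ⟨hr, _⟩
      · exact hr
      · exact absurd hr (by simp)
    set d : Nat := (PySem.Int.mod c (cs.length : Int)).toNat with hd
    have hdlt : d < cs.length := by omega
    have hdint : (d : Int) = c % (cs.length : Int) := by omega
    -- the consumed character is cs[d]
    have hch : ch = cs[d] := by
      have h1 := congrArg (fun l => l[0]?) hr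
      simp only [List.getElem?_cons_zero, List.getElem?_drop, Nat.add_zero] at h1
      rw [List.getElem?_eq_getElem hdlt] at h1
      exact Option.some.inj h1
    have ht : t = cs.drop (d + 1) := by
      have := congrArg List.tail hr
      simpa using this
    -- c = n*q + d
    obtain ⟨q, hq⟩ : ∃ q, c = (cs.length : Int) * q + (d : Int) :=
      ⟨c / (cs.length : Int), by
        have := Int.mul_ediv_add_emod c (cs.length : Int)
        omega⟩
    have hmodc1 : PySem.Int.mod (c + 1) (cs.length : Int) = (c + 1) % (cs.length : Int) :=
      PySem.Int.mod_eq_emod_of_pos hn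
    -- next-state invariant
    have hnext : t = cs.drop (PySem.Int.mod (c + 1) (cs.length : Int)).toNat ∨
        (t = [] ∧ PySem.Int.mod (c + 1) (cs.length : Int) = 0) := by
      by_cases hdl : d + 1 = cs.length
      · right
        refine ⟨by rw [ht, List.drop_eq_nil_iff]; omega, ?_⟩
        rw [hmodc1]
        have hlen : ((cs.length : Nat) : Int) = (d : Int) + 1 := by exact_mod_cast congrArg (Nat.cast : Nat → Int) hdl.symm
        have hc1 : c + 1 = (cs.length : Int) * (q + 1) := by rw [hq, hlen]; ring
        rw [hc1]
        exact Int.mul_emod_right _ _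
      · left
        rw [ht]
        congr 1
        have h1 : c + 1 = ((d : Int) + 1) + (cs.length : Int) * q := by rw [hq]; ring
        have h2 : (c + 1) % (cs.length : Int) = ((d : Int) + 1) % (cs.length : Int) := by
          rw [h1, Int.add_mul_emod_self_left]
        have h3 : ((d : Int) + 1) % (cs.length : Int) = (d : Int) + 1 :=
          Int.emod_eq_of_lt (by omega) (by omega)
        omega
    rw [ih (by omega) hnext,
      PySem.List.pyRange_one_cons (a := c) (b := num + 1) (by omega)]
    have hf : (PySem.List.pyGetD cs (PySem.Int.mod c (cs.length : Int)) ' ') = cs[d] := by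
      have hcast : PySem.Int.mod c (cs.length : Int) = ((d : Nat) : Int) := by omega
      rw [hcast, PySem.List.pyGetD_natCast]
      simp [List.getD_eq_getElem?_getD, List.getElem?_eq_getElem hdlt]
    simp [hf, hch]

-- first t elements of the periodic sequence, t within the first pass, are a prefix
theorem range_map_getD_take {α : Type} (xs : List α) (d : α) (t : Nat) (ht : t ≤ xs.length) :
    (List.range t).map (fun k => xs.getD (k % xs.length) d) = xs.take t := by
  apply List.ext_getElem
  · simp [ht]
  · intro k h1 h2
    simp only [List.length_map, List.length_range] at h1
    have hk : k < xs.length := lt_of_lt_of_le h1 ht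
    simp [List.getElem_take, Nat.mod_eq_of_lt hk,
      List.getD_eq_getElem?_getD, List.getElem?_eq_getElem hk]

-- first t elements of the periodic sequence = whole copies + remainder prefix
theorem cycle_take {α : Type} (xs : List α) (d : α) (hx : xs ≠ []) (t : Nat) :
    (List.range t).map (fun k => xs.getD (k % xs.length) d) =
      (List.replicate (t / xs.length) xs).flatten ++ xs.take (t % xs.length) := by
  have hn : 0 < xs.length := List.length_pos_iff.mpr hx
  induction t using Nat.strong_induction_on with
  | _ t ih =>
    by_cases hlt : t < xs.length
    · rw [Nat.div_eq_of_lt hlt, Nat.mod_eq_of_lt hlt]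
      simp only [List.replicate_zero, List.flatten_nil, List.nil_append]
      exact range_map_getD_take xs d t (le_of_lt hlt)
    · rw [not_lt] at hlt
      obtain ⟨s, hs⟩ : ∃ s, t = xs.length + s := ⟨t - xs.length, by omega⟩
      subst hs
      rw [List.range_add, List.map_append, List.map_map]
      have h1 : (List.range xs.length).map (fun k => xs.getD (k % xs.length) d) = xs := by
        rw [range_map_getD_take xs d xs.length le_rfl, List.take_length]
      have h2 : (List.range s).map ((fun k => xs.getD (k % xs.length) d) ∘ (xs.length + ·))
          = (List.range s).map (fun k => xs.getD (k % xs.length) d) := by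
        apply List.map_congr_left
        intro k _
        simp [Function.comp, Nat.add_mod_left]
      have hdiv : (xs.length + s) / xs.length = s / xs.length + 1 := by
        rw [Nat.add_comm, Nat.add_div_right _ hn]
      have hmod : (xs.length + s) % xs.length = s % xs.length := Nat.add_mod_left _ _
      rw [h1, h2, ih s (by omega), hdiv, hmod, List.replicate_succ, List.flatten_cons,
        List.append_assoc]

-- ===== VERDICT (by name: the statement is the Claim_ definition above) =====
theorem iter_list_spec : Claim_equal_iter_list := by
  intro user_str num _
  unfold Spec_iter_list iter_list iter_list_alt
  by_cases h : user_str.toList = []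
  · simp [h]
  · have hn : 0 < user_str.toList.length := List.length_pos_iff.mpr h
    have hnI : (0 : Int) < (user_str.toList.length : Int) := by exact_mod_cast hn
    simp only []
    rw [dif_neg h, iterListGoA_spec user_str.toList num h _ 0 [] le_rfl
      (Or.inl (by rw [PySem.Int.mod_eq_emod_of_pos hnI]; simp))]
    simp only [List.nil_append]
    by_cases htot : num + 1 ≤ 0
    · rw [if_pos (Or.inr htot), PySem.List.pyRange_one_eq_nil (by omega)]
      simp
    · rw [if_neg (by simp [h]; omega)]
      obtain ⟨t, ht⟩ : ∃ t : Nat, num + 1 = (t : Int) := ⟨(num + 1).toNat, by omega⟩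
      rw [ht]
      have hlen : ((user_str.toList.map Char.toString).length : Int)
          = (user_str.toList.length : Int) := by simp
      rw [hlen]
      rw [PySem.Int.floordiv_natCast, PySem.Int.mod_natCast]
      rw [PySem.List.pyRange_zero_natCast]
      rw [List.map_map]
      have hmm : ∀ k : Nat,
          ((fun i => (PySem.List.pyGetD user_str.toList (PySem.Int.mod i (user_str.toList.length : Int)) ' ').toString) ∘ (fun k : Nat => (k : Int))) k
          = (user_str.toList.getD (k % user_str.toList.length) ' ').toString := by
        intro k
        simp only [Function.comp]
        rw [show PySem.Int.mod (k : Int) (user_str.toList.length : Int)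
            = ((k % user_str.toList.length : Nat) : Int) from by
          rw [PySem.Int.mod_natCast]]
        rw [PySem.List.pyGetD_natCast]
      rw [List.map_congr_left (fun k _ => hmm k)]
      rw [show (fun k : Nat => (user_str.toList.getD (k % user_str.toList.length) ' ').toString)
          = (fun x => Char.toString x) ∘ (fun k : Nat => user_str.toList.getD (k % user_str.toList.length) ' ') from rfl,
        ← List.map_map]
      rw [cycle_take user_str.toList ' ' h t]
      have hrep : ∀ (l : List String) (m : Nat),
          PySem.List.pyRepeat l ((m : Nat) : Int) = (List.replicate m l).flatten := by
        intro l m; simp [PySem.List.pyRepeat]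
      rw [hrep, Int.toNat_natCast]
      have hts : (fun x => String.singleton x) = Char.toString := funext fun c => rfl
      simp [List.map_append, List.map_take, List.map_replicate, hts]
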